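-- pv_equiv track=rewrite | github.com/mataeo-eh/SC2_DBN | src_new/extractors/upgrade_extractor.py | get_upgrade_summary
-- ===== SOURCE A (Python) =====
-- from typing import Dict, Set, Tuple, Optional
--
-- def get_upgrade_summary(upgrades_data: Dict[str, Dict]) -> str:
--     """
--     Get a human-readable summary of upgrades.
--
--     Args:
--         upgrades_data: Output from extract()
--
--     Returns:
--         Formatted string summary
--
--     Example:
--         "3 upgrades (Weapons: 1, Armor: 1, Other: 1)"
--     """
--     if not upgrades_data:
--         return "No upgrades completed"
--
--     # Count by category
--     category_counts = {}
--     for upgrade_data in upgrades_data.values():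
--         category = upgrade_data['category']
--         category_counts[category] = category_counts.get(category, 0) + 1
--
--     total = len(upgrades_data)
--     categories_str = ", ".join([f"{cat.capitalize()}: {count}"
--                                for cat, count in sorted(category_counts.items())])
--
--     return f"{total} upgrades ({categories_str})"
-- ===== SOURCE B (Python) =====
-- from itertools import groupby
--
-- def get_upgrade_summary(upgrades_data):
--     if not upgrades_data:
--         return "No upgrades completed"
--     cats = sorted(v['category'] for v in upgrades_data.values())
--     parts = [f"{cat.capitalize()}: {sum(1 for _ in group)}"
--              for cat, group in groupby(cats)]
--     return f"{len(upgrades_data)} upgrades ({', '.join(parts)})"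
-- ===== Notes on version B (the rewrite author's own statement) =====
-- stated objective: alternative
-- what changed: Instead of building a category->count dict and sorting its items, B extracts all category strings, sorts them once, and forms counted runs with itertools.groupby, formatting each run directly.
import Mathlib
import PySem

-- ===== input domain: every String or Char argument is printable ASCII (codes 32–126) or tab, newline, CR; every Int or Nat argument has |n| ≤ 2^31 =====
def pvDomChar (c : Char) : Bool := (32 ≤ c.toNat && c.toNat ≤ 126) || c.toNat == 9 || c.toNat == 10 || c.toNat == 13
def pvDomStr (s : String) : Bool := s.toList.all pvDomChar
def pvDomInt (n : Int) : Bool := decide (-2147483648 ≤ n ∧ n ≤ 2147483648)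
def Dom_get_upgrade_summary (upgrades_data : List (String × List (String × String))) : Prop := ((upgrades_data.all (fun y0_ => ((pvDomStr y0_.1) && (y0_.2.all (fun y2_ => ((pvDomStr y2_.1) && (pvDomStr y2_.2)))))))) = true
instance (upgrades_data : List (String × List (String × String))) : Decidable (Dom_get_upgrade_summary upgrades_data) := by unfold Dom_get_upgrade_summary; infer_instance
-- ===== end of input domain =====

-- B replaces A's category->count dict with sort-then-groupby run counting (alternative decomposition, same cost).


-- str.capitalize(): first char uppercased, the rest lowercased (exact on ASCII)
def pyCapitalize (s : String) : String :=
  match s.toList with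
  | [] => s
  | c :: cs => String.ofList (PySem.Chars.upperChar c :: PySem.Chars.lower cs)

-- ===== PORT A =====
def get_upgrade_summary (upgrades_data : List (String × List (String × String))) : String :=
  if upgrades_data.isEmpty then "No upgrades completed"
  else
    -- category_counts[category] = category_counts.get(category, 0) + 1 over the dict's values
    let category_counts : PySem.Dict String Int :=
      (PySem.Dict.mk upgrades_data).values.foldl
        (fun d upgrade_data =>
          d.modify (((PySem.Dict.mk upgrade_data).get? "category").getD "") 0 (· + 1))
        PySem.Dict.empty
    let total : Int := (PySem.Dict.mk upgrades_data).size
    -- sorted(category_counts.items()): keys are distinct, so the tuple sort is the sort by key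
    let categories_str : String :=
      PySem.Str.join ", "
        ((PySem.List.sorted category_counts.items (fun p => p.1) false).map
          (fun p => pyCapitalize p.1 ++ ": " ++ PySem.Int.toStr p.2))
    PySem.Int.toStr total ++ " upgrades (" ++ categories_str ++ ")"

-- ===== PORT B =====
-- itertools.groupby over a list of strings: counted runs of equal adjacent elements
def groupRuns : List String → List (String × Int)
  | [] => []
  | c :: cs =>
      (c, 1 + (cs.takeWhile (· = c)).length) :: groupRuns (cs.dropWhile (· = c))
termination_by s => s.length
decreasing_by
  simp only [List.length_cons]
  exact Nat.lt_succ_of_le (List.length_dropWhile_le _ _)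

def get_upgrade_summary_alt (upgrades_data : List (String × List (String × String))) : String :=
  if upgrades_data.isEmpty then "No upgrades completed"
  else
    let cats : List String :=
      PySem.List.sorted
        ((PySem.Dict.mk upgrades_data).values.map
          (fun v => ((PySem.Dict.mk v).get? "category").getD ""))
        (fun s => s) false
    let parts : List String :=
      (groupRuns cats).map (fun p => pyCapitalize p.1 ++ ": " ++ PySem.Int.toStr p.2)
    PySem.Int.toStr (upgrades_data.length : Int) ++ " upgrades (" ++ PySem.Str.join ", " parts ++ ")"

-- ===== PRECONDITION & SPEC =====
-- Pre_ requires every value dict to carry the 'category' key (A raises KeyError otherwise), and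
-- distinct keys at both dict levels: a Python dict cannot hold duplicate keys, so an assoc list
-- with duplicates has no faithful dict counterpart (Python would collapse them, last value winning).
def Pre_get_upgrade_summary (upgrades_data : List (String × List (String × String))) : Prop :=
  (upgrades_data.map Prod.fst).Nodup ∧
  ∀ p ∈ upgrades_data, (p.2.map Prod.fst).Nodup ∧ "category" ∈ p.2.map Prod.fst
instance (upgrades_data : List (String × List (String × String))) : Decidable (Pre_get_upgrade_summary upgrades_data) := by unfold Pre_get_upgrade_summary; infer_instance

def pvWitness_get_upgrade_summary : (List (String × List (String × String))) :=
  [("a", [("category", "weapons")]), ("b", [("category", "armor")])]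

def Spec_get_upgrade_summary (upgrades_data : List (String × List (String × String))) (out : String) : Prop := out = get_upgrade_summary_alt upgrades_data
instance (upgrades_data : List (String × List (String × String))) (out : String) : Decidable (Spec_get_upgrade_summary upgrades_data out) := by unfold Spec_get_upgrade_summary; infer_instance

-- ===== CLAIM (what is proved, stated in full; the proofs are below) =====
def Claim_equal_get_upgrade_summary : Prop := ∀ (upgrades_data : List (String × List (String × String))), Dom_get_upgrade_summary upgrades_data → Pre_get_upgrade_summary upgrades_data → Spec_get_upgrade_summary upgrades_data (get_upgrade_summary upgrades_data)

-- ===== LEMMAS AND PROOFS =====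

-- every element of dropWhile (· = c) of an ascending list is strictly above c
theorem lt_of_mem_dropWhile (c : String) (cs : List String)
    (hs : cs.Pairwise (· ≤ ·)) (hc : ∀ x ∈ cs, c ≤ x) (x : String)
    (hx : x ∈ cs.dropWhile (· = c)) :
    c < x := by
  cases hr : cs.dropWhile (· = c) with
  | nil => rw [hr] at hx; simp at hx
  | cons y ys =>
    have hy : ¬ (y = c) := by
      have := List.head?_dropWhile_not (fun z => decide (z = c)) cs
      rw [hr] at this
      simpa using this
    have hyc : c < y :=
      lt_of_le_of_ne (hc y ((List.dropWhile_sublist _).mem (hr ▸ List.mem_cons_self)))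
        (Ne.symm hy)
    rw [hr] at hx
    rcases List.mem_cons.mp hx with rfl | hx'
    · exact hyc
    · have hpw : (y :: ys).Pairwise (· ≤ ·) := hr ▸ hs.sublist (List.dropWhile_sublist _)
      exact lt_of_lt_of_le hyc ((List.pairwise_cons.mp hpw).1 x hx')

-- characterisation of groupRuns on an ascending list: membership
theorem mem_groupRuns (s : List String) (hs : s.Pairwise (· ≤ ·)) (p : String × Int) :
    p ∈ groupRuns s ↔ p.1 ∈ s ∧ p.2 = (s.count p.1 : Int) := by
  induction s using groupRuns.induct with
  | case1 => simp [groupRuns]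
  | case2 c cs ih =>
    obtain ⟨hc, hcs⟩ := List.pairwise_cons.mp hs
    have hr : (cs.dropWhile (· = c)).Pairwise (· ≤ ·) := hcs.sublist (List.dropWhile_sublist _)
    have hrlt := lt_of_mem_dropWhile c cs hcs hc
    have htc : ∀ x ∈ cs.takeWhile (· = c), x = c :=
      fun x hx => by simpa using List.mem_takeWhile_imp hx
    have hsplit : cs.takeWhile (· = c) ++ cs.dropWhile (· = c) = cs :=
      List.takeWhile_append_dropWhile
    have hcs_count : ∀ k, cs.count k
        = (cs.takeWhile (· = c)).count k + (cs.dropWhile (· = c)).count k := by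
      intro k
      conv_lhs => rw [← hsplit]
      exact List.count_append ..
    have hcount_c : (c :: cs).count c = 1 + (cs.takeWhile (· = c)).length := by
      have h1 : (cs.takeWhile (· = c)).count c = (cs.takeWhile (· = c)).length :=
        List.count_eq_length.mpr (fun b hb => (htc b hb).symm)
      have h2 : (cs.dropWhile (· = c)).count c = 0 :=
        List.count_eq_zero.mpr (fun hmem => lt_irrefl c (hrlt c hmem))
      rw [List.count_cons_self, hcs_count c, h1, h2]
      omega
    have hcount_r : ∀ k, k ≠ c →
        (c :: cs).count k = (cs.dropWhile (· = c)).count k := by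
      intro k hkc
      have h1 : (cs.takeWhile (· = c)).count k = 0 :=
        List.count_eq_zero.mpr (fun hmem => hkc (htc k hmem))
      simp [Ne.symm hkc, hcs_count k, h1]
    rw [groupRuns, List.mem_cons, ih hr]
    constructor
    · rintro (rfl | ⟨h1, h2⟩)
      · refine ⟨List.mem_cons_self, ?_⟩
        rw [hcount_c]
        push_cast
        ring
      · have hkc : p.1 ≠ c := fun h => lt_irrefl c (h ▸ hrlt p.1 h1)
        refine ⟨List.mem_cons_of_mem _ ((List.dropWhile_sublist _).mem h1), ?_⟩
        rw [hcount_r p.1 hkc]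
        exact h2
    · rintro ⟨h1, h2⟩
      by_cases hpc : p.1 = c
      · left
        rw [hpc, hcount_c] at h2
        refine Prod.ext hpc ?_
        rw [h2]
        push_cast
        ring
      · right
        have hpcs : p.1 ∈ cs := (List.mem_cons.mp h1).resolve_left hpc
        have hpr : p.1 ∈ cs.dropWhile (· = c) := by
          rw [← hsplit] at hpcs
          rcases List.mem_append.mp hpcs with ht | hd
          · exact absurd (htc p.1 ht) hpc
          · exact hd
        rw [hcount_r p.1 hpc] at h2
        exact ⟨hpr, h2⟩

-- characterisation of groupRuns on an ascending list: strictly increasing keys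
theorem pairwise_groupRuns (s : List String) (hs : s.Pairwise (· ≤ ·)) :
    (groupRuns s).Pairwise (fun a b => a.1 < b.1) := by
  induction s using groupRuns.induct with
  | case1 => simp [groupRuns]
  | case2 c cs ih =>
    obtain ⟨hc, hcs⟩ := List.pairwise_cons.mp hs
    have hr : (cs.dropWhile (· = c)).Pairwise (· ≤ ·) := hcs.sublist (List.dropWhile_sublist _)
    rw [groupRuns, List.pairwise_cons]
    refine ⟨?_, ih hr⟩
    intro q hq
    exact lt_of_mem_dropWhile c cs hcs hc q.1 ((mem_groupRuns _ hr q).mp hq).1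

theorem sorted_items_eq (cats : List String) :
    PySem.List.sorted (PySem.Dict.counter cats).items (fun p => p.1) false
      = groupRuns (PySem.List.sorted cats (fun s => s) false) := by
  set s := PySem.List.sorted cats (fun s => s) false with hsdef
  have hperm : s.Perm cats := PySem.List.sorted_perm ..
  have hs : s.Pairwise (· ≤ ·) := PySem.List.sorted_pairwise ..
  have hnodupG : (groupRuns s).Nodup :=
    (pairwise_groupRuns s hs).imp (fun h heq => by simp [heq] at h)
  have hnodupI : ((PySem.Set.ofList cats).map (fun k => (k, (cats.count k : Int)))).Nodup :=
    (PySem.Set.nodup_ofList cats).map (fun a b h => congrArg Prod.fst h)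
  have hmemeq : ∀ p, p ∈ groupRuns s ↔
      p ∈ (PySem.Set.ofList cats).map (fun k => (k, (cats.count k : Int))) := by
    intro p
    rw [mem_groupRuns s hs p]
    simp only [List.mem_map, PySem.Set.mem_ofList]
    constructor
    · rintro ⟨h1, h2⟩
      exact ⟨p.1, hperm.mem_iff.mp h1, by rw [← hperm.count_eq]; exact Prod.ext rfl (by simpa using h2.symm)⟩
    · rintro ⟨k, hk, rfl⟩
      exact ⟨hperm.mem_iff.mpr hk, by rw [hperm.count_eq]⟩
  have hp : (groupRuns s).Perm ((PySem.Set.ofList cats).map (fun k => (k, (cats.count k : Int)))) :=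
    (List.perm_ext_iff_of_nodup hnodupG hnodupI).mpr hmemeq
  rw [PySem.Dict.items_counter]
  exact PySem.List.sorted_eq_of_perm_of_pairwise_lt _ _ _ hp (pairwise_groupRuns s hs)

-- ===== VERDICT (by name: the statement is the Claim_ definition above) =====
theorem get_upgrade_summary_spec : Claim_equal_get_upgrade_summary := by
  intro upgrades_data _ _
  unfold Spec_get_upgrade_summary get_upgrade_summary get_upgrade_summary_alt
  by_cases he : upgrades_data.isEmpty
  · simp [he]
  · simp only [he]
    rw [show ∀ (l : List (List (String × String))) (i : PySem.Dict String Int),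
        l.foldl (fun d ud => d.modify (((PySem.Dict.mk ud).get? "category").getD "") 0 (· + 1)) i
          = (l.map (fun ud => ((PySem.Dict.mk ud).get? "category").getD "")).foldl
              (fun d x => d.modify x 0 (· + 1)) i
        from fun l i => by rw [List.foldl_map]]
    rw [← PySem.Dict.counter_eq_foldl, sorted_items_eq]
    rfl
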